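-- pv_equiv track=rewrite | github.com/jtrner/redtorch_tools | dev/scratch/Mari/Mary_rig_v0003/Mary_build.py | create_alpha_dictionary
-- ===== SOURCE A (Python) =====
-- import itertools
--
-- def create_alpha_dictionary(depth=4):
--     ad = {}
--     mit = 0
--     for its in range(depth)[1:]:
--         for combo in itertools.product('abcdefghijklmnopqrstuvwxyz', repeat=its):
--             ad[mit] = ''.join(combo)
--             mit += 1
--     return ad
-- ===== SOURCE B (Python) =====
-- def create_alpha_dictionary(depth=4):
--     ad = {}
--     mit = 0
--     current = ['']
--     for its in range(1, depth):
--         current = [s + c for s in current for c in 'abcdefghijklmnopqrstuvwxyz']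
--         for s in current:
--             ad[mit] = s
--             mit += 1
--     return ad
-- ===== Notes on version B (the rewrite author's own statement) =====
-- stated objective: alternative
-- what changed: Replaces the per-length itertools.product recomputation with an incremental DP: a rolling list of length-k strings is extended by one letter to get the length-(k+1) strings, reusing prior work instead of rebuilding each product from scratch.
import Mathlib
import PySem

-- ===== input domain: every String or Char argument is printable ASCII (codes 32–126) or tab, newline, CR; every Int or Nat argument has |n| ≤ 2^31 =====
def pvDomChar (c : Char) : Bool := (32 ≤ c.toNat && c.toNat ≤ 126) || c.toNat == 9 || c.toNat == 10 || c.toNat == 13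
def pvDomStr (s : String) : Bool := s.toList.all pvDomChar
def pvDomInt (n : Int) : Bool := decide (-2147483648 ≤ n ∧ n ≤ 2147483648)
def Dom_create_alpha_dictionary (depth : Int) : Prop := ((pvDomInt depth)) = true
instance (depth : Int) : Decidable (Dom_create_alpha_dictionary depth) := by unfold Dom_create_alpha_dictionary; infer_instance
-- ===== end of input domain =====

-- B builds each length's strings incrementally from the previous length's rolling list
-- instead of recomputing itertools.product per length; same return value (objective: alternative).

def pvAlpha : List Char := "abcdefghijklmnopqrstuvwxyz".toList

-- ===== PORT A =====
-- itertools.product('a'..'z', repeat=n): leftmost position varies slowest.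
def pvProduct (n : Nat) : List (List Char) :=
  match n with
  | 0 => [[]]
  | n + 1 => pvAlpha.flatMap (fun c => (pvProduct n).map (fun rest => c :: rest))

-- inner loop body: ad[mit] = ''.join(combo); mit += 1
def pvInsA (st2 : PySem.Dict Int String × Int) (combo : List Char) : PySem.Dict Int String × Int :=
  (st2.1.insert st2.2 (String.ofList combo), st2.2 + 1)

-- one outer iteration of A: loop over itertools.product(alphabet, repeat=its)
def pvStepA (st : PySem.Dict Int String × Int) (its : Int) : PySem.Dict Int String × Int :=
  (pvProduct its.toNat).foldl pvInsA st

def create_alpha_dictionary (depth : Int) : List (Int × String) :=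
  ((PySem.List.slice (PySem.List.pyRange 0 depth 1) (some 1) none).foldl
      pvStepA (PySem.Dict.empty, 0)).1.items

-- ===== PORT B =====
-- inner loop body: ad[mit] = s; mit += 1
def pvInsB (p : PySem.Dict Int String × Int) (s : String) : PySem.Dict Int String × Int :=
  (p.1.insert p.2 s, p.2 + 1)

-- one outer iteration of B: extend the rolling list by one letter, then assign its strings
def pvStepB (st : PySem.Dict Int String × Int × List String) (_its : Int) :
    PySem.Dict Int String × Int × List String :=
  let current := st.2.2.flatMap (fun s => pvAlpha.map (fun c => s.push c))
  let st2 := current.foldl pvInsB (st.1, st.2.1)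
  (st2.1, st2.2, current)

def create_alpha_dictionary_alt (depth : Int) : List (Int × String) :=
  ((PySem.List.pyRange 1 depth 1).foldl pvStepB (PySem.Dict.empty, 0, [""])).1.items

-- ===== PRECONDITION & SPEC =====
def Spec_create_alpha_dictionary (depth : Int) (out : List (Int × String)) : Prop := out = create_alpha_dictionary_alt depth
instance (depth : Int) (out : List (Int × String)) : Decidable (Spec_create_alpha_dictionary depth out) := by unfold Spec_create_alpha_dictionary; infer_instance

-- ===== CLAIM (what is proved, stated in full; the proofs are below) =====
def Claim_equal_create_alpha_dictionary : Prop := ∀ (depth : Int), Dom_create_alpha_dictionary depth → Spec_create_alpha_dictionary depth (create_alpha_dictionary depth)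

-- ===== LEMMAS AND PROOFS =====

-- extend every word on the RIGHT by one alphabet letter (B's step, on char lists)
def pvExtR (L : List (List Char)) : List (List Char) :=
  L.flatMap (fun s => pvAlpha.map (fun c => s ++ [c]))

theorem pvExtR_prepend (L : List (List Char)) :
    pvAlpha.flatMap (fun c => (pvExtR L).map (fun r => c :: r))
      = pvExtR (pvAlpha.flatMap (fun c => L.map (fun r => c :: r))) := by
  simp only [pvExtR, List.map_flatMap, List.flatMap_map, List.flatMap_assoc, List.map_map, Function.comp_def, List.cons_append]

theorem pvProduct_succ_right : ∀ n : Nat, pvProduct (n + 1) = pvExtR (pvProduct n)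
  | 0 => by decide
  | n + 1 => by
      show pvAlpha.flatMap (fun c => (pvProduct (n + 1)).map (fun rest => c :: rest))
          = pvExtR (pvProduct (n + 1))
      rw [pvProduct_succ_right n, pvExtR_prepend,
        show pvAlpha.flatMap (fun c => (pvProduct n).map (fun rest => c :: rest))
            = pvProduct (n + 1) from rfl,
        pvProduct_succ_right n]

theorem pvPush_ofList (l : List Char) (c : Char) :
    (String.ofList l).push c = String.ofList (l ++ [c]) := by
  apply String.ext
  simp [String.toList_push]

-- B's rolling `current` holds exactly A's product strings at the next length.
theorem pvCurrent_step (n : Nat) :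
    ((pvProduct n).map String.ofList).flatMap (fun s => pvAlpha.map (fun c => s.push c))
      = (pvProduct (n + 1)).map String.ofList := by
  rw [pvProduct_succ_right]
  simp [pvExtR, List.map_flatMap, List.flatMap_map, List.map_map, Function.comp_def, pvPush_ofList, String.ofList_append]

-- assigning B's mapped strings is A's inner product loop
theorem pvInner_eq (l : List (List Char)) (st : PySem.Dict Int String × Int) :
    (l.map String.ofList).foldl pvInsB st = l.foldl pvInsA st := by
  rw [List.foldl_map]
  rfl

-- the two outer folds agree given the rolling-list invariant
theorem pvFold_eq (k : Nat) : ∀ (a b : Int) (st : PySem.Dict Int String × Int),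
    1 ≤ a → (b - a).toNat = k →
    ((PySem.List.pyRange a b 1).foldl pvStepA st)
      = (((PySem.List.pyRange a b 1).foldl pvStepB
            (st.1, st.2, (pvProduct (a - 1).toNat).map String.ofList)).1,
         ((PySem.List.pyRange a b 1).foldl pvStepB
            (st.1, st.2, (pvProduct (a - 1).toNat).map String.ofList)).2.1)
  | a, b, st, ha, hk => by
    induction k generalizing a st with
    | zero =>
        rw [PySem.List.pyRange_one_eq_nil (by omega)]
        simp
    | succ k ih =>
        rw [PySem.List.pyRange_one_cons (by omega)]
        simp only [List.foldl_cons]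
        have hcur : ((pvProduct (a - 1).toNat).map String.ofList).flatMap
              (fun s => pvAlpha.map (fun c => s.push c))
            = (pvProduct ((a + 1) - 1).toNat).map String.ofList := by
          rw [pvCurrent_step, show (a - 1).toNat + 1 = ((a + 1) - 1).toNat by omega]
        have hstep : pvStepB (st.1, st.2, (pvProduct (a - 1).toNat).map String.ofList) a
            = ((pvStepA st a).1, (pvStepA st a).2,
               (pvProduct ((a + 1) - 1).toNat).map String.ofList) := by
          show (_, _, _) = _
          rw [hcur]
          have : ((pvProduct ((a + 1) - 1).toNat).map String.ofList).foldl pvInsB (st.1, st.2)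
              = pvStepA st a := by
            rw [pvInner_eq, show (st.1, st.2) = st from rfl, pvStepA,
              show ((a + 1) - 1).toNat = a.toNat by omega]
          rw [this]
        rw [hstep]
        exact ih (a + 1) (pvStepA st a) (by omega) (by omega)

-- range(depth)[1:] is range(1, depth)
theorem pvSlice_range (depth : Int) :
    PySem.List.slice (PySem.List.pyRange 0 depth 1) (some 1) none
      = PySem.List.pyRange 1 depth 1 := by
  rw [PySem.List.slice_from_one]
  by_cases h : depth ≤ 0
  · rw [PySem.List.pyRange_one_eq_nil (by omega : depth ≤ (0:Int)), PySem.List.pyRange_one_eq_nil (by omega : depth ≤ (1:Int))]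
    rfl
  · rw [PySem.List.pyRange_one_cons (by omega : (0:Int) < depth)]
    simp

-- ===== VERDICT (by name: the statement is the Claim_ definition above) =====
theorem create_alpha_dictionary_spec : Claim_equal_create_alpha_dictionary := by
  intro depth _
  unfold Spec_create_alpha_dictionary create_alpha_dictionary create_alpha_dictionary_alt
  rw [pvSlice_range]
  by_cases h : depth ≤ 1
  · rw [PySem.List.pyRange_one_eq_nil (by omega)]
    simp
  · have := pvFold_eq (depth - 1).toNat 1 depth (PySem.Dict.empty, 0) (by omega) rfl
    rw [show ((1 : Int) - 1).toNat = 0 from rfl] at this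
    rw [show (pvProduct 0).map String.ofList = [""] from rfl] at this
    rw [this]
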